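-- pv_equiv track=rewrite | github.com/rjbatista/AoC | aoc/event2016/day22/solve.py | find_valid_pairs
-- ===== SOURCE A (Python) =====
-- import itertools
--
-- def find_valid_pairs(graph):
--     perm = itertools.combinations(graph.items(), 2)
--
--     valid = []
--     for ((x1, y1), (_, u1, a1)), ((x2, y2), (_, u2, a2)) in perm:
--         if abs(x1 - x2) + abs(y1 - y2) == 1:
--             if 0 < u1 <= a2:
--                 valid += [((x1, y1), (x2, y2))]
--
--             if 0 < u2 <= a1:
--                 valid += [((x2, y2), (x1, y1))]
--
--     return valid
-- ===== SOURCE B (Python) =====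
-- def find_valid_pairs(graph):
--     # O(n): index each node's (position, used, avail) by coordinate, then for
--     # each node inspect only its 4 grid neighbours, emitting pairs in A's order.
--     info = {}
--     for i, ((x, y), (_, u, a)) in enumerate(graph.items()):
--         info[(x, y)] = (i, u, a)
--
--     valid = []
--     for i, ((x, y), (_, u1, a1)) in enumerate(graph.items()):
--         nbs = []
--         for c in ((x - 1, y), (x + 1, y), (x, y - 1), (x, y + 1)):
--             e = info.get(c)
--             if e is not None and e[0] > i:
--                 nbs.append((e[0], c, e[1], e[2]))
--         nbs.sort(key=lambda e: e[0])
--         for (_, c, u2, a2) in nbs: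
--             if 0 < u1 <= a2:
--                 valid.append(((x, y), c))
--             if 0 < u2 <= a1:
--                 valid.append((c, (x, y)))
--     return valid
-- ===== Notes on version B (the rewrite author's own statement) =====
-- stated objective: faster
-- what changed: Instead of testing all O(n^2) unordered pairs via itertools.combinations, B builds one coordinate->(index,used,avail) dictionary and for each node looks up only its 4 grid neighbours, keeping those with larger index and sorting the at-most-4 hits by index to reproduce A's emission order.
import Mathlib
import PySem

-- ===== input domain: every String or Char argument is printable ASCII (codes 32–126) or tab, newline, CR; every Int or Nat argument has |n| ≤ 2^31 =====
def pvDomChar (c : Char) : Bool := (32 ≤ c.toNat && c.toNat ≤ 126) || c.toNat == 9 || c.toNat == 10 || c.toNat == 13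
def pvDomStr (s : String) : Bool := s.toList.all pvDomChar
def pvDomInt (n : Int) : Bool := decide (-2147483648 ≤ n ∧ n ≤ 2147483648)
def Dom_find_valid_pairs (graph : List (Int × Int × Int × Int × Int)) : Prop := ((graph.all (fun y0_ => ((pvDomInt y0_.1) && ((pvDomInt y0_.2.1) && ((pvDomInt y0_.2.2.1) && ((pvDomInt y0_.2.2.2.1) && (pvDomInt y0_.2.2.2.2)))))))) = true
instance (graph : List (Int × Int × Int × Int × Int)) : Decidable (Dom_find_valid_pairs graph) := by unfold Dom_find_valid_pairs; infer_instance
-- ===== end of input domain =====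

-- B replaces A's scan over all O(n^2) combinations by a coordinate-indexed
-- dictionary and a lookup of each node's 4 grid neighbours (objective: faster).

-- ===== PORT A =====
-- itertools.combinations(l, 2): ordered pairs, first component earlier in l
def pvCombs {α : Type} (l : List α) : List (α × α) :=
  match l with
  | [] => []
  | x :: xs => xs.map (fun y => (x, y)) ++ pvCombs xs

-- a tuple t = (x, y, size, used, avail): t.1 = x, t.2.1 = y, t.2.2.2.1 = used, t.2.2.2.2 = avail
def find_valid_pairs (graph : List (Int × Int × Int × Int × Int)) : List ((Int × Int) × (Int × Int)) :=
  (pvCombs graph).foldl (fun valid pq =>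
    if (pq.1.1 - pq.2.1).natAbs + (pq.1.2.1 - pq.2.2.1).natAbs = 1 then
      (valid ++
        (if 0 < pq.1.2.2.2.1 ∧ pq.1.2.2.2.1 ≤ pq.2.2.2.2.2 then [((pq.1.1, pq.1.2.1), (pq.2.1, pq.2.2.1))] else [])) ++
        (if 0 < pq.2.2.2.2.1 ∧ pq.2.2.2.2.1 ≤ pq.1.2.2.2.2 then [((pq.2.1, pq.2.2.1), (pq.1.1, pq.1.2.1))] else [])
    else valid) []

-- ===== PORT B =====
-- the 4 grid neighbours of (x, y), in the order B's Python iterates them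
def pvNbrs (x y : Int) : List (Int × Int) := [(x - 1, y), (x + 1, y), (x, y - 1), (x, y + 1)]

def find_valid_pairs_alt (graph : List (Int × Int × Int × Int × Int)) : List ((Int × Int) × (Int × Int)) :=
  -- info[(x, y)] = (index, used, avail)
  let info : PySem.Dict (Int × Int) (Int × Int × Int) :=
    (PySem.List.enumerate graph).foldl
      (fun d it => d.insert (it.2.1, it.2.2.1) (it.1, it.2.2.2.2.1, it.2.2.2.2.2)) PySem.Dict.empty
  (PySem.List.enumerate graph).foldl (fun valid it =>
    let nbs := (pvNbrs it.2.1 it.2.2.1).foldl (fun acc c =>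
      match info.get? c with
      | some e => if e.1 > it.1 then acc ++ [(e.1, c, e.2.1, e.2.2)] else acc
      | none => acc) []
    (PySem.List.sorted nbs (fun e => e.1) false).foldl (fun v e =>
      (v ++ (if 0 < it.2.2.2.2.1 ∧ it.2.2.2.2.1 ≤ e.2.2.2 then [((it.2.1, it.2.2.1), e.2.1)] else [])) ++
        (if 0 < e.2.2.1 ∧ e.2.2.1 ≤ it.2.2.2.2.2 then [(e.2.1, (it.2.1, it.2.2.1))] else [])) valid) []

-- ===== PRECONDITION & SPEC =====
-- Pre_ excludes only lists with duplicate (x, y) coordinates: such lists do not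
-- represent any Python argument (A's argument is a dict, whose keys are unique).
def Pre_find_valid_pairs (graph : List (Int × Int × Int × Int × Int)) : Prop :=
  (graph.map (fun t => ((t.1, t.2.1) : Int × Int))).Nodup
instance (graph : List (Int × Int × Int × Int × Int)) : Decidable (Pre_find_valid_pairs graph) := by
  unfold Pre_find_valid_pairs; infer_instance

def pvWitness_find_valid_pairs : (List (Int × Int × Int × Int × Int)) :=
  [(0, 0, 10, 5, 8), (0, 1, 10, 3, 9), (1, 0, 10, 0, 2)]

def Spec_find_valid_pairs (graph : List (Int × Int × Int × Int × Int)) (out : List ((Int × Int) × (Int × Int))) : Prop := out = find_valid_pairs_alt graph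
instance (graph : List (Int × Int × Int × Int × Int)) (out : List ((Int × Int) × (Int × Int))) : Decidable (Spec_find_valid_pairs graph out) := by unfold Spec_find_valid_pairs; infer_instance

-- ===== CLAIM (what is proved, stated in full; the proofs are below) =====
def Claim_equal_find_valid_pairs : Prop := ∀ (graph : List (Int × Int × Int × Int × Int)), Dom_find_valid_pairs graph → Pre_find_valid_pairs graph → Spec_find_valid_pairs graph (find_valid_pairs graph)

-- ===== LEMMAS AND PROOFS =====

def pvD0 : Int × Int × Int × Int × Int := (0, 0, 0, 0, 0)
def pvKey (t : Int × Int × Int × Int × Int) : Int × Int := (t.1, t.2.1)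
def pvEmit2 (x y u1 a1 : Int) (e : (Int × Int) × Int × Int) : List ((Int × Int) × (Int × Int)) :=
  (if 0 < u1 ∧ u1 ≤ e.2.2 then [((x, y), e.1)] else []) ++
    (if 0 < e.2.1 ∧ e.2.1 ≤ a1 then [(e.1, (x, y))] else [])
def pvEmit (t u : Int × Int × Int × Int × Int) : List ((Int × Int) × (Int × Int)) :=
  if (t.1 - u.1).natAbs + (t.2.1 - u.2.1).natAbs = 1 then
    pvEmit2 t.1 t.2.1 t.2.2.2.1 t.2.2.2.2 ((u.1, u.2.1), u.2.2.2.1, u.2.2.2.2)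
  else []
def pvInfo (graph : List (Int × Int × Int × Int × Int)) : PySem.Dict (Int × Int) (Int × Int × Int) :=
  (PySem.List.enumerate graph).foldl
    (fun d it => d.insert (it.2.1, it.2.2.1) (it.1, it.2.2.2.2.1, it.2.2.2.2.2)) PySem.Dict.empty
def pvLook (info : PySem.Dict (Int × Int) (Int × Int × Int)) (i : Int) (c : Int × Int) :
    Option (Int × (Int × Int) × Int × Int) :=
  (info.get? c).bind (fun e => if e.1 > i then some (e.1, c, e.2.1, e.2.2) else none)

theorem pv_A_flat (g : List (Int × Int × Int × Int × Int)) :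
    find_valid_pairs g = (pvCombs g).flatMap (fun pq => pvEmit pq.1 pq.2) := by
  unfold find_valid_pairs
  have hf : (fun (valid : List ((Int × Int) × (Int × Int))) (pq : (Int × Int × Int × Int × Int) × (Int × Int × Int × Int × Int)) =>
      if (pq.1.1 - pq.2.1).natAbs + (pq.1.2.1 - pq.2.2.1).natAbs = 1 then
        (valid ++
          (if 0 < pq.1.2.2.2.1 ∧ pq.1.2.2.2.1 ≤ pq.2.2.2.2.2 then [((pq.1.1, pq.1.2.1), (pq.2.1, pq.2.2.1))] else [])) ++
          (if 0 < pq.2.2.2.2.1 ∧ pq.2.2.2.2.1 ≤ pq.1.2.2.2.2 then [((pq.2.1, pq.2.2.1), (pq.1.1, pq.1.2.1))] else [])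
      else valid) = fun valid pq => valid ++ pvEmit pq.1 pq.2 := by
    funext valid pq
    simp only [pvEmit, pvEmit2]
    split_ifs <;> simp [List.append_assoc]
  rw [hf, PySem.List.foldl_append_eq_flatMap]
  simp

theorem pv_A_range (g : List (Int × Int × Int × Int × Int)) :
    (pvCombs g).flatMap (fun pq => pvEmit pq.1 pq.2) =
      (List.range g.length).flatMap (fun k => (g.drop (k + 1)).flatMap (pvEmit (g.getD k pvD0))) := by
  induction g with
  | nil => simp [pvCombs]
  | cons t r ih =>
    simp only [pvCombs, List.flatMap_append, ih, List.length_cons, List.range_succ_eq_map,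
      List.flatMap_cons, List.flatMap_map]
    congr 1

theorem pv_nbs (info : PySem.Dict (Int × Int) (Int × Int × Int)) (i : Int) :
    ∀ (cs : List (Int × Int)) (acc : List (Int × (Int × Int) × Int × Int)),
      cs.foldl (fun acc c =>
        match info.get? c with
        | some e => if e.1 > i then acc ++ [(e.1, c, e.2.1, e.2.2)] else acc
        | none => acc) acc = acc ++ cs.filterMap (pvLook info i) := by
  intro cs
  induction cs with
  | nil => intro acc; simp
  | cons c cs ih =>
    intro acc
    simp only [List.foldl_cons, List.filterMap_cons, pvLook]
    cases h : info.get? c with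
    | none => simp [ih, pvLook]
    | some e =>
      by_cases hgt : e.1 > i
      · simp [hgt, ih, pvLook]
      · simp [hgt, ih, pvLook]

theorem pv_B_flat (g : List (Int × Int × Int × Int × Int)) :
    find_valid_pairs_alt g = (PySem.List.enumerate g).flatMap (fun it =>
      (PySem.List.sorted ((pvNbrs it.2.1 it.2.2.1).filterMap (pvLook (pvInfo g) it.1)) (fun e => e.1) false).flatMap
        (fun e => pvEmit2 it.2.1 it.2.2.1 it.2.2.2.2.1 it.2.2.2.2.2 e.2)) := by
  show (PySem.List.enumerate g).foldl (fun valid it =>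
      (PySem.List.sorted ((pvNbrs it.2.1 it.2.2.1).foldl (fun acc c =>
        match (pvInfo g).get? c with
        | some e => if e.1 > it.1 then acc ++ [(e.1, c, e.2.1, e.2.2)] else acc
        | none => acc) []) (fun e => e.1) false).foldl (fun v e =>
      (v ++ (if 0 < it.2.2.2.2.1 ∧ it.2.2.2.2.1 ≤ e.2.2.2 then [((it.2.1, it.2.2.1), e.2.1)] else [])) ++
        (if 0 < e.2.2.1 ∧ e.2.2.1 ≤ it.2.2.2.2.2 then [(e.2.1, (it.2.1, it.2.2.1))] else [])) valid) [] = _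
  have hstep : (fun (valid : List ((Int × Int) × (Int × Int))) (it : Int × Int × Int × Int × Int × Int) =>
      (PySem.List.sorted ((pvNbrs it.2.1 it.2.2.1).foldl (fun acc c =>
        match (pvInfo g).get? c with
        | some e => if e.1 > it.1 then acc ++ [(e.1, c, e.2.1, e.2.2)] else acc
        | none => acc) []) (fun e => e.1) false).foldl (fun v e =>
      (v ++ (if 0 < it.2.2.2.2.1 ∧ it.2.2.2.2.1 ≤ e.2.2.2 then [((it.2.1, it.2.2.1), e.2.1)] else [])) ++
        (if 0 < e.2.2.1 ∧ e.2.2.1 ≤ it.2.2.2.2.2 then [(e.2.1, (it.2.1, it.2.2.1))] else [])) valid) =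
      fun valid it => valid ++
        (PySem.List.sorted ((pvNbrs it.2.1 it.2.2.1).filterMap (pvLook (pvInfo g) it.1)) (fun e => e.1) false).flatMap
          (fun e => pvEmit2 it.2.1 it.2.2.1 it.2.2.2.2.1 it.2.2.2.2.2 e.2) := by
    funext valid it
    rw [pv_nbs, List.nil_append]
    have hinner : (fun (v : List ((Int × Int) × (Int × Int))) (e : Int × (Int × Int) × Int × Int) =>
        (v ++ (if 0 < it.2.2.2.2.1 ∧ it.2.2.2.2.1 ≤ e.2.2.2 then [((it.2.1, it.2.2.1), e.2.1)] else [])) ++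
          (if 0 < e.2.2.1 ∧ e.2.2.1 ≤ it.2.2.2.2.2 then [(e.2.1, (it.2.1, it.2.2.1))] else [])) =
        fun v e => v ++ pvEmit2 it.2.1 it.2.2.1 it.2.2.2.2.1 it.2.2.2.2.2 e.2 := by
      funext v e
      simp [pvEmit2, List.append_assoc]
    rw [hinner, PySem.List.foldl_append_eq_flatMap]
  rw [hstep, PySem.List.foldl_append_eq_flatMap]
  simp

theorem pv_enum_flatMap {α β : Type} (F : Int × α → List β) (d : α) (l : List α) (s : Nat) :
    (PySem.List.enumerate l (s : Int)).flatMap F =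
      (List.range l.length).flatMap (fun k => F (((s + k : Nat) : Int), l.getD k d)) := by
  induction l generalizing s with
  | nil => simp [PySem.List.enumerate]
  | cons x xs ih =>
    rw [PySem.List.enumerate_cons, List.flatMap_cons]
    have hcast : (s : Int) + 1 = ((s + 1 : Nat) : Int) := by push_cast; ring
    rw [hcast, ih (s + 1)]
    simp only [List.length_cons, List.range_succ_eq_map, List.flatMap_cons, List.flatMap_map, Nat.add_zero,
      List.getD_cons_zero, List.getD_cons_succ]
    congr 1
    refine List.flatMap_congr ?_
    intro k0 _
    have harith : s + 1 + k0 = s + (k0 + 1) := by omega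
    rw [harith]

theorem pv_enum_flatMap0 {α β : Type} (F : Int × α → List β) (d : α) (l : List α) :
    (PySem.List.enumerate l).flatMap F =
      (List.range l.length).flatMap (fun (k : Nat) => F ((k : Int), l.getD k d)) := by
  have h := pv_enum_flatMap F d l 0
  simpa using h

theorem pv_pairwise_filterMap {α β : Type} (f : α → Option β) {R : α → α → Prop} {S : β → β → Prop}
    (h : ∀ a a' b b', b ∈ f a → b' ∈ f a' → R a a' → S b b') :
    ∀ {l : List α}, l.Pairwise R → (l.filterMap f).Pairwise S := by
  intro l hl
  induction hl with
  | nil => simp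
  | @cons a l hhead _htail ih =>
    rw [List.filterMap_cons]
    cases hfa : f a with
    | none => exact ih
    | some b =>
      refine List.Pairwise.cons ?_ ih
      intro b' hb'
      obtain ⟨a', ha', hfa'⟩ := List.mem_filterMap.mp hb'
      exact h a a' b b' hfa hfa' (hhead a' ha')

theorem pv_nbrs_nodup (x y : Int) : (pvNbrs x y).Nodup := by
  simp [pvNbrs, Prod.ext_iff]
  omega

theorem pv_info_items (g : List (Int × Int × Int × Int × Int)) (hnd : (g.map pvKey).Nodup) :
    (pvInfo g).items = (PySem.List.enumerate g).map
      (fun it => ((it.2.1, it.2.2.1), (it.1, it.2.2.2.2.1, it.2.2.2.2.2))) := by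
  have hfresh : ∀ it ∈ PySem.List.enumerate g,
      (PySem.Dict.empty : PySem.Dict (Int × Int) (Int × Int × Int)).contains (it.2.1, it.2.2.1) = false := by
    intro it _; simp [PySem.Dict.contains_empty]
  have hkeys : ((PySem.List.enumerate g).map (fun it => ((it.2.1, it.2.2.1) : Int × Int))).Nodup := by
    have : ((PySem.List.enumerate g).map (fun it => ((it.2.1, it.2.2.1) : Int × Int))) = g.map pvKey := by
      have h2 := PySem.List.map_snd_enumerate g (0 : Int)
      calc ((PySem.List.enumerate g).map (fun it => ((it.2.1, it.2.2.1) : Int × Int)))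
          = ((PySem.List.enumerate g).map (·.2)).map pvKey := by
            rw [List.map_map]; rfl
        _ = g.map pvKey := by rw [h2]
    rw [this]; exact hnd
  have h := PySem.Dict.items_foldl_insert_fresh (PySem.List.enumerate g)
      (fun it => ((it.2.1, it.2.2.1) : Int × Int))
      (fun it => ((it.1, it.2.2.2.2.1, it.2.2.2.2.2) : Int × Int × Int))
      PySem.Dict.empty hfresh hkeys
  simpa [pvInfo] using h

theorem pv_info_keys_nodup (g : List (Int × Int × Int × Int × Int)) (hnd : (g.map pvKey).Nodup) :
    (pvInfo g).keys.Nodup := by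
  have : (pvInfo g).keys = g.map pvKey := by
    show (pvInfo g).items.map (·.1) = g.map pvKey
    rw [pv_info_items g hnd, List.map_map]
    have h2 := PySem.List.map_snd_enumerate g (0 : Int)
    calc (PySem.List.enumerate g).map ((·.1) ∘ (fun it => ((it.2.1, it.2.2.1), (it.1, it.2.2.2.2.1, it.2.2.2.2.2))))
        = ((PySem.List.enumerate g).map (·.2)).map pvKey := by rw [List.map_map]; rfl
      _ = g.map pvKey := by rw [h2]
  rw [this]; exact hnd

theorem pv_info_get (g : List (Int × Int × Int × Int × Int)) (hnd : (g.map pvKey).Nodup)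
    (c : Int × Int) (v : Int × Int × Int) :
    (pvInfo g).get? c = some v ↔
      ∃ (m : Nat) (hm : m < g.length), pvKey g[m] = c ∧
        v = ((m : Int), g[m].2.2.2.1, g[m].2.2.2.2) := by
  rw [PySem.Dict.get?_eq_some_iff_mem_items _ _ _ (pv_info_keys_nodup g hnd),
    pv_info_items g hnd, List.mem_map]
  constructor
  · rintro ⟨it, hit, heq⟩
    obtain ⟨m, hm, rfl⟩ := (PySem.List.mem_enumerate_iff _ _ _).mp hit
    refine ⟨m, hm, ?_, ?_⟩
    · exact congrArg Prod.fst heq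
    · have := congrArg Prod.snd heq
      simpa using this.symm
  · rintro ⟨m, hm, hkey, rfl⟩
    refine ⟨((m : Int), g[m]), ?_, ?_⟩
    · exact (PySem.List.mem_enumerate_iff _ _ _).mpr ⟨m, hm, by simp⟩
    · simp only [Prod.mk.injEq]
      exact ⟨hkey, by simp⟩

theorem pv_mem_js (g : List (Int × Int × Int × Int × Int)) (hnd : (g.map pvKey).Nodup)
    (k : Nat) (x y : Int) (e : Int × (Int × Int) × Int × Int) :
    e ∈ (pvNbrs x y).filterMap (pvLook (pvInfo g) (k : Int)) ↔
      ∃ (m : Nat) (hm : m < g.length), k < m ∧ pvKey g[m] ∈ pvNbrs x y ∧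
        e = ((m : Int), pvKey g[m], g[m].2.2.2.1, g[m].2.2.2.2) := by
  rw [List.mem_filterMap]
  constructor
  · rintro ⟨c, hc, hlook⟩
    unfold pvLook at hlook
    obtain ⟨v, hv, hif⟩ := Option.bind_eq_some_iff.mp hlook
    obtain ⟨m, hm, hkey, rfl⟩ := (pv_info_get g hnd c v).mp hv
    by_cases hgt : ((m : Int), g[m].2.2.2.1, g[m].2.2.2.2).1 > (k : Int)
    · rw [if_pos hgt] at hif
      have hkm : k < m := by
        simp only [gt_iff_lt] at hgt
        exact_mod_cast hgt
      refine ⟨m, hm, hkm, hkey ▸ hc, ?_⟩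
      simpa [hkey] using hif.symm
    · rw [if_neg hgt] at hif; exact absurd hif (by simp)
  · rintro ⟨m, hm, hkm, hmem, rfl⟩
    refine ⟨pvKey g[m], hmem, ?_⟩
    unfold pvLook
    rw [(pv_info_get g hnd (pvKey g[m]) ((m : Int), g[m].2.2.2.1, g[m].2.2.2.2)).mpr ⟨m, hm, rfl, rfl⟩]
    have hgt : ((m : Int), g[m].2.2.2.1, g[m].2.2.2.2).1 > (k : Int) := by
      simp only [gt_iff_lt]; exact_mod_cast hkm
    simp [hgt]

theorem pv_mem_E (g : List (Int × Int × Int × Int × Int)) (k : Nat) (x y : Int)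
    (e : Int × (Int × Int) × Int × Int) :
    e ∈ (PySem.List.enumerate (g.drop (k + 1)) ((k + 1 : Nat) : Int)).filterMap (fun it =>
        if pvKey it.2 ∈ pvNbrs x y then some (it.1, pvKey it.2, it.2.2.2.2.1, it.2.2.2.2.2) else none) ↔
      ∃ (m : Nat) (hm : m < g.length), k < m ∧ pvKey g[m] ∈ pvNbrs x y ∧
        e = ((m : Int), pvKey g[m], g[m].2.2.2.1, g[m].2.2.2.2) := by
  rw [List.mem_filterMap]
  constructor
  · rintro ⟨it, hit, hif⟩
    obtain ⟨j, hj, rfl⟩ := (PySem.List.mem_enumerate_iff _ _ _).mp hit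
    have hj' : j < g.length - (k + 1) := by simpa using hj
    have hget : (g.drop (k + 1))[j] = g[k + 1 + j]'(by omega) := List.getElem_drop
    by_cases hmem : pvKey (g.drop (k + 1))[j] ∈ pvNbrs x y
    · rw [if_pos hmem] at hif
      have he := Option.some.inj hif
      refine ⟨k + 1 + j, by omega, by omega, ?_, ?_⟩
      · rw [← hget]; exact hmem
      · rw [← he]
        simp only [hget]
        congr 1
    · rw [if_neg hmem] at hif; exact absurd hif (by simp)
  · rintro ⟨m, hm, hkm, hmem, rfl⟩
    have hj : m - (k + 1) < (g.drop (k + 1)).length := by simp; omega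
    refine ⟨(((k + 1 : Nat) : Int) + (m - (k + 1) : Nat), (g.drop (k + 1))[m - (k + 1)]), ?_, ?_⟩
    · exact (PySem.List.mem_enumerate_iff _ _ _).mpr ⟨m - (k + 1), hj, rfl⟩
    · have hget : (g.drop (k + 1))[m - (k + 1)] = g[k + 1 + (m - (k + 1))]'(by omega) := List.getElem_drop
      have hg2 : (g.drop (k + 1))[m - (k + 1)] = g[m] := by
        rw [hget]; congr 1; omega
      rw [if_pos (by rw [hg2]; exact hmem)]
      rw [hg2]
      have hc : (((k + 1 : Nat) : Int)) + ((m - (k + 1) : Nat) : Int) = (m : Int) := by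
        rw [← Nat.cast_add]
        congr 1
        omega
      rw [hc]

theorem pv_sorted_core (g : List (Int × Int × Int × Int × Int))
    (hnd : (g.map pvKey).Nodup) (k : Nat) (_hk : k < g.length) :
    PySem.List.sorted ((pvNbrs (g.getD k pvD0).1 (g.getD k pvD0).2.1).filterMap (pvLook (pvInfo g) (k : Int)))
        (fun e => e.1) false =
      (PySem.List.enumerate (g.drop (k + 1)) ((k + 1 : Nat) : Int)).filterMap (fun it =>
        if pvKey it.2 ∈ pvNbrs (g.getD k pvD0).1 (g.getD k pvD0).2.1 then
          some (it.1, pvKey it.2, it.2.2.2.2.1, it.2.2.2.2.2) else none) := by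
  set x := (g.getD k pvD0).1
  set y := (g.getD k pvD0).2.1
  have hpwE : ((PySem.List.enumerate (g.drop (k + 1)) ((k + 1 : Nat) : Int)).filterMap (fun it =>
      if pvKey it.2 ∈ pvNbrs x y then some (it.1, pvKey it.2, it.2.2.2.2.1, it.2.2.2.2.2) else none)).Pairwise
      (fun a b => a.1 < b.1) := by
    refine pv_pairwise_filterMap _ ?_ (PySem.List.pairwise_lt_enumerate _ _)
    intro a a' b b' hb hb' hR
    have h1 : b.1 = a.1 := by
      by_cases h : pvKey a.2 ∈ pvNbrs x y
      · rw [if_pos h] at hb; simp at hb; rw [← hb]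
      · rw [if_neg h] at hb; exact absurd hb (by simp)
    have h2 : b'.1 = a'.1 := by
      by_cases h : pvKey a'.2 ∈ pvNbrs x y
      · rw [if_pos h] at hb'; simp at hb'; rw [← hb']
      · rw [if_neg h] at hb'; exact absurd hb' (by simp)
    rw [h1, h2]; exact hR
  have hndE : ((PySem.List.enumerate (g.drop (k + 1)) ((k + 1 : Nat) : Int)).filterMap (fun it =>
      if pvKey it.2 ∈ pvNbrs x y then some (it.1, pvKey it.2, it.2.2.2.2.1, it.2.2.2.2.2) else none)).Nodup := by
    refine hpwE.imp ?_
    intro a b hab heq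
    rw [heq] at hab
    exact lt_irrefl _ hab
  have hndjs : ((pvNbrs x y).filterMap (pvLook (pvInfo g) (k : Int))).Nodup := by
    refine List.Nodup.filterMap ?_ (pv_nbrs_nodup x y)
    intro a a' b hb hb'
    unfold pvLook at hb hb'
    obtain ⟨v, _, hif⟩ := Option.bind_eq_some_iff.mp hb
    obtain ⟨v', _, hif'⟩ := Option.bind_eq_some_iff.mp hb'
    have ha : b.2.1 = a := by
      by_cases h : v.1 > (k : Int)
      · rw [if_pos h] at hif; simp at hif; rw [← hif]
      · rw [if_neg h] at hif; exact absurd hif (by simp)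
    have ha' : b.2.1 = a' := by
      by_cases h : v'.1 > (k : Int)
      · rw [if_pos h] at hif'; simp at hif'; rw [← hif']
      · rw [if_neg h] at hif'; exact absurd hif' (by simp)
    rw [← ha, ha']
  have hperm : ((PySem.List.enumerate (g.drop (k + 1)) ((k + 1 : Nat) : Int)).filterMap (fun it =>
      if pvKey it.2 ∈ pvNbrs x y then some (it.1, pvKey it.2, it.2.2.2.2.1, it.2.2.2.2.2) else none)).Perm
      ((pvNbrs x y).filterMap (pvLook (pvInfo g) (k : Int))) := by
    rw [List.perm_ext_iff_of_nodup hndE hndjs]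
    intro e
    rw [pv_mem_E g k x y e, pv_mem_js g hnd k x y e]
  exact PySem.List.sorted_eq_of_perm_of_pairwise_lt _ _ _ hperm hpwE

theorem pv_adj_iff (x y : Int) (c : Int × Int) :
    (c ∈ pvNbrs x y) = ((x - c.1).natAbs + (y - c.2).natAbs = 1) := by
  obtain ⟨cx, cy⟩ := c
  simp only [pvNbrs, List.mem_cons, List.not_mem_nil, or_false, Prod.mk.injEq]
  apply propext
  constructor
  · rintro (⟨h1, h2⟩ | ⟨h1, h2⟩ | ⟨h1, h2⟩ | ⟨h1, h2⟩) <;> omega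
  · intro h; omega

theorem pv_fme {α γ R : Type} (p : α → Prop) [DecidablePred p] (h : α → γ) (F : γ → List R)
    (l : List α) (s : Int) :
    ((PySem.List.enumerate l s).filterMap (fun it => if p it.2 then some (it.1, h it.2) else none)).flatMap
        (fun e => F e.2) =
      l.flatMap (fun u => if p u then F (h u) else []) := by
  induction l generalizing s with
  | nil => simp [PySem.List.enumerate]
  | cons x xs ih =>
    rw [PySem.List.enumerate_cons, List.filterMap_cons]
    by_cases hp : p x
    · simp only [if_pos hp, List.flatMap_cons]
      rw [ih]
    · simp only [if_neg hp, List.flatMap_cons]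
      rw [ih]
      simp

theorem pv_inner (g : List (Int × Int × Int × Int × Int)) (k : Nat) (_hk : k < g.length) :
    ((PySem.List.enumerate (g.drop (k + 1)) ((k + 1 : Nat) : Int)).filterMap (fun it =>
        if pvKey it.2 ∈ pvNbrs (g.getD k pvD0).1 (g.getD k pvD0).2.1 then
          some (it.1, pvKey it.2, it.2.2.2.2.1, it.2.2.2.2.2) else none)).flatMap
      (fun e => pvEmit2 (g.getD k pvD0).1 (g.getD k pvD0).2.1 (g.getD k pvD0).2.2.2.1 (g.getD k pvD0).2.2.2.2 e.2) =
    (g.drop (k + 1)).flatMap (pvEmit (g.getD k pvD0)) := by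
  rw [pv_fme (fun u => pvKey u ∈ pvNbrs (g.getD k pvD0).1 (g.getD k pvD0).2.1)
    (fun u => ((pvKey u, u.2.2.2.1, u.2.2.2.2) : (Int × Int) × Int × Int))]
  refine List.flatMap_congr ?_
  intro u hu
  simp only [pvEmit, pvKey]
  simp only [pv_adj_iff]

-- ===== VERDICT (by name: the statement is the Claim_ definition above) =====
theorem find_valid_pairs_spec : Claim_equal_find_valid_pairs := by
  intro g _hdom hpre
  unfold Spec_find_valid_pairs
  rw [pv_A_flat, pv_A_range, pv_B_flat, pv_enum_flatMap0 _ pvD0 g]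
  refine List.flatMap_congr ?_
  intro k hk
  have hk' : k < g.length := List.mem_range.mp hk
  rw [pv_sorted_core g hpre k hk', pv_inner g k hk']
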